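-- pv_equiv track=rewrite | github.com/sbeaumont/AoC | 2021/AoC-2021-5.py | part_2
-- ===== SOURCE A (Python) =====
-- from collections import defaultdict, Counter
--
-- def part_2(entries):
--     vents = defaultdict(int)
--
--     for entry in entries:
--         x1, y1 = entry[0]
--         x2, y2 = entry[1]
--         if x1 == x2:
--             for y in range(min(y1, y2), max(y1, y2) + 1):
--                 vents[(x1, y)] += 1
--         elif y1 == y2:
--             for x in range(min(x1, x2), max(x1, x2) + 1):
--                 vents[(x, y1)] += 1
--         elif (x1 < x2 and y1 < y2) or (y2 < y1 and x2 < x1):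
--             for i in range(abs(x2 - x1) + 1):
--                 vents[(min(x1, x2) + i, min(y1, y2) + i)] += 1
--         else:
--             for i in range(abs(x2 - x1) + 1):
--                 vents[(max(x1, x2) - i, min(y1, y2) + i)] += 1
--
--     vent_counts = Counter(vents)
--     return len([e for e in vent_counts.values() if e >= 2])
-- ===== SOURCE B (Python) =====
-- def part_2(entries):
--     def points(entry):
--         (x1, y1), (x2, y2) = entry
--         if x1 == x2:
--             start, step, n = (x1, min(y1, y2)), (0, 1), abs(y2 - y1)
--         elif y1 == y2:
--             start, step, n = (min(x1, x2), y1), (1, 0), abs(x2 - x1)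
--         elif (x1 < x2) == (y1 < y2):
--             start, step, n = (min(x1, x2), min(y1, y2)), (1, 1), abs(x2 - x1)
--         else:
--             start, step, n = (max(x1, x2), min(y1, y2)), (-1, 1), abs(x2 - x1)
--         return [(start[0] + i * step[0], start[1] + i * step[1]) for i in range(n + 1)]
--
--     pts = sorted(p for entry in entries for p in points(entry))
--     total = 0
--     i = 0
--     while i < len(pts):
--         j = i + 1
--         while j < len(pts) and pts[j] == pts[i]:
--             j += 1
--         if j - i >= 2:
--             total += 1
--         i = j
--     return total
-- ===== Notes on version B (the rewrite author's own statement) =====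
-- stated objective: alternative
-- what changed: B replaces A's hash-map counting (defaultdict updated cell by cell, Counter copy, filter of values) by a sort-then-scan: it generates each segment's cells from one (start, step, length) description, sorts the flat cell list lexicographically, and counts maximal runs of length >= 2 with a two-index scan - no dictionary or counter at all.
import Mathlib
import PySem

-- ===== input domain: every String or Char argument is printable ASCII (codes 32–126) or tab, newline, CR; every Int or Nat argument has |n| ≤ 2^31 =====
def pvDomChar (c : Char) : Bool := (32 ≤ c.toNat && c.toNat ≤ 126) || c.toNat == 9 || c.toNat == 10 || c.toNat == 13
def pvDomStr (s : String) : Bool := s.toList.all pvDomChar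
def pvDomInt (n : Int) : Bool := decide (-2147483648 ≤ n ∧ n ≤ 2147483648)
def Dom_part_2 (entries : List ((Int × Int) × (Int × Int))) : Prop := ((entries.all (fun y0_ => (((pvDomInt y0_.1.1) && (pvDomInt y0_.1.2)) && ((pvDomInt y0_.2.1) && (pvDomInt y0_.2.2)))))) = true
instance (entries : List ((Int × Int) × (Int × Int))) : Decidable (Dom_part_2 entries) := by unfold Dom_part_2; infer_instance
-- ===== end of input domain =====

-- B is a different algorithm: instead of A's hash-map counting, it flattens every segment's cells
-- into one list, sorts it lexicographically, and counts maximal runs of length ≥ 2 with a scan.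

-- ===== PORT A =====
def part_2 (entries : List ((Int × Int) × (Int × Int))) : Int :=
  let vents : PySem.Dict (Int × Int) Int :=
    entries.foldl (fun vents entry =>
      let x1 := entry.1.1; let y1 := entry.1.2
      let x2 := entry.2.1; let y2 := entry.2.2
      if x1 = x2 then
        (PySem.List.pyRange (min y1 y2) (max y1 y2 + 1) 1).foldl
          (fun d y => d.modify (x1, y) 0 (· + 1)) vents
      else if y1 = y2 then
        (PySem.List.pyRange (min x1 x2) (max x1 x2 + 1) 1).foldl
          (fun d x => d.modify (x, y1) 0 (· + 1)) vents
      else if (x1 < x2 ∧ y1 < y2) ∨ (y2 < y1 ∧ x2 < x1) then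
        (PySem.List.pyRange 0 (((x2 - x1).natAbs : Int) + 1) 1).foldl
          (fun d i => d.modify (min x1 x2 + i, min y1 y2 + i) 0 (· + 1)) vents
      else
        (PySem.List.pyRange 0 (((x2 - x1).natAbs : Int) + 1) 1).foldl
          (fun d i => d.modify (max x1 x2 - i, min y1 y2 + i) 0 (· + 1)) vents
      ) PySem.Dict.empty
  -- Counter(vents) copies the dict's counts unchanged (same keys, same values)
  let vent_counts := vents
  ((vent_counts.values.filter (fun e => 2 ≤ e)).length : Int)

-- ===== PORT B =====
def pvPoints (entry : (Int × Int) × (Int × Int)) : List (Int × Int) :=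
  let x1 := entry.1.1; let y1 := entry.1.2
  let x2 := entry.2.1; let y2 := entry.2.2
  let sdn : (Int × Int) × (Int × Int) × Int :=
    if x1 = x2 then ((x1, min y1 y2), (0, 1), ((y2 - y1).natAbs : Int))
    else if y1 = y2 then ((min x1 x2, y1), (1, 0), ((x2 - x1).natAbs : Int))
    else if (decide (x1 < x2)) = (decide (y1 < y2)) then
      ((min x1 x2, min y1 y2), (1, 1), ((x2 - x1).natAbs : Int))
    else ((max x1 x2, min y1 y2), (-1, 1), ((x2 - x1).natAbs : Int))
  (PySem.List.pyRange 0 (sdn.2.2 + 1) 1).map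
    (fun i => (sdn.1.1 + i * sdn.2.1.1, sdn.1.2 + i * sdn.2.1.2))

-- the outer while-loop of Source B: advance past the run of cells equal to pts[i], add 1 if the run has length ≥ 2
def pvScanRuns : List (Int × Int) → Int
  | [] => 0
  | p :: rest =>
      (if (2 : Int) ≤ 1 + ((rest.takeWhile (fun q => q == p)).length : Int) then 1 else 0)
        + pvScanRuns (rest.dropWhile (fun q => q == p))
termination_by l => l.length
decreasing_by exact Nat.lt_succ_of_le (List.length_dropWhile_le _ _)

-- sorted(...) on pairs of ints = stable sort by the lexicographic order (library sort)
def part_2_alt (entries : List ((Int × Int) × (Int × Int))) : Int :=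
  let pts := (entries.flatMap pvPoints).mergeSort
    (fun a b => decide ((toLex a : Int ×ₗ Int) ≤ toLex b))
  pvScanRuns pts

-- ===== PRECONDITION & SPEC =====
def Spec_part_2 (entries : List ((Int × Int) × (Int × Int))) (out : Int) : Prop := out = part_2_alt entries
instance (entries : List ((Int × Int) × (Int × Int))) (out : Int) : Decidable (Spec_part_2 entries out) := by unfold Spec_part_2; infer_instance

-- ===== CLAIM (what is proved, stated in full; the proofs are below) =====
def Claim_equal_part_2 : Prop := ∀ (entries : List ((Int × Int) × (Int × Int))), Dom_part_2 entries → Spec_part_2 entries (part_2 entries)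

-- ===== LEMMAS AND PROOFS =====

-- the common yardstick: number of distinct cells of l that occur at least twice in l
def pvD (l : List (Int × Int)) : Nat :=
  ((PySem.List.dedup l).filter (fun k => decide ((2 : Int) ≤ (l.count k : Int)))).length

-- ----- A side: the dict loop is Counter of the flat cell list -----

-- Two modify-folds over integer ranges agree when the ranges have the same length
-- and the key functions agree position by position.
theorem pvFold_eq (a b c e : Int) (f g : Int → Int × Int) (d : PySem.Dict (Int × Int) Int)
    (hlen : (b - a).toNat = (e - c).toNat)
    (hk : ∀ k : Nat, k < (b - a).toNat → f (a + k) = g (c + k)) :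
    (PySem.List.pyRange a b 1).foldl (fun d x => d.modify (f x) 0 (· + 1)) d =
    (PySem.List.pyRange c e 1).foldl (fun d x => d.modify (g x) 0 (· + 1)) d := by
  rw [PySem.List.pyRange_one, PySem.List.pyRange_one, List.foldl_map, List.foldl_map, ← hlen]
  exact PySem.List.foldl_congr_mem _ _ _ _ (by
    intro acc k hkmem
    rw [hk k (List.mem_range.mp hkmem)])

-- A's entry loop, rewritten as a modify-fold over pvPoints entry.
theorem pvEntry_fold (d : PySem.Dict (Int × Int) Int) (entry : (Int × Int) × (Int × Int)) :
    (let x1 := entry.1.1; let y1 := entry.1.2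
     let x2 := entry.2.1; let y2 := entry.2.2
     if x1 = x2 then
       (PySem.List.pyRange (min y1 y2) (max y1 y2 + 1) 1).foldl
         (fun d y => d.modify (x1, y) 0 (· + 1)) d
     else if y1 = y2 then
       (PySem.List.pyRange (min x1 x2) (max x1 x2 + 1) 1).foldl
         (fun d x => d.modify (x, y1) 0 (· + 1)) d
     else if (x1 < x2 ∧ y1 < y2) ∨ (y2 < y1 ∧ x2 < x1) then
       (PySem.List.pyRange 0 (((x2 - x1).natAbs : Int) + 1) 1).foldl
         (fun d i => d.modify (min x1 x2 + i, min y1 y2 + i) 0 (· + 1)) d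
     else
       (PySem.List.pyRange 0 (((x2 - x1).natAbs : Int) + 1) 1).foldl
         (fun d i => d.modify (max x1 x2 - i, min y1 y2 + i) 0 (· + 1)) d) =
    (pvPoints entry).foldl (fun d k => d.modify k 0 (· + 1)) d := by
  obtain ⟨⟨x1, y1⟩, ⟨x2, y2⟩⟩ := entry
  simp only [pvPoints, List.foldl_map]
  split_ifs with h1 h2 h3 h4 h4 <;>
    first
    | (exfalso; rw [decide_eq_decide] at h4; omega)
    | (dsimp only
       apply pvFold_eq
       · omega
       · intro k hk
         refine Prod.ext ?_ ?_ <;> dsimp only <;> ring)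

-- A's outer loop equals the pvPoints-based loop.
theorem pvOuter_fold (entries : List ((Int × Int) × (Int × Int)))
    (d : PySem.Dict (Int × Int) Int) :
    entries.foldl (fun vents entry =>
      let x1 := entry.1.1; let y1 := entry.1.2
      let x2 := entry.2.1; let y2 := entry.2.2
      if x1 = x2 then
        (PySem.List.pyRange (min y1 y2) (max y1 y2 + 1) 1).foldl
          (fun d y => d.modify (x1, y) 0 (· + 1)) vents
      else if y1 = y2 then
        (PySem.List.pyRange (min x1 x2) (max x1 x2 + 1) 1).foldl
          (fun d x => d.modify (x, y1) 0 (· + 1)) vents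
      else if (x1 < x2 ∧ y1 < y2) ∨ (y2 < y1 ∧ x2 < x1) then
        (PySem.List.pyRange 0 (((x2 - x1).natAbs : Int) + 1) 1).foldl
          (fun d i => d.modify (min x1 x2 + i, min y1 y2 + i) 0 (· + 1)) vents
      else
        (PySem.List.pyRange 0 (((x2 - x1).natAbs : Int) + 1) 1).foldl
          (fun d i => d.modify (max x1 x2 - i, min y1 y2 + i) 0 (· + 1)) vents
      ) d =
    entries.foldl (fun d e => (pvPoints e).foldl (fun d k => d.modify k 0 (· + 1)) d) d :=
  PySem.List.foldl_congr_mem _ _ _ _ (fun acc e _ => pvEntry_fold acc e)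

-- A's result is the number of distinct cells covered at least twice.
theorem pvA_eq (entries : List ((Int × Int) × (Int × Int))) :
    part_2 entries = (pvD (entries.flatMap pvPoints) : Int) := by
  unfold part_2
  rw [pvOuter_fold, ← List.foldl_flatMap, ← PySem.Dict.counter_eq_foldl]
  unfold pvD
  rw [PySem.List.dedup_eq_ofList]
  simp only [PySem.Dict.values, PySem.Dict.items_counter, List.map_map, List.filter_map,
    List.length_map]
  rfl

-- ----- B side -----

-- perm invariance of the yardstick
theorem pvD_perm {l l' : List (Int × Int)} (h : l.Perm l') : pvD l = pvD l' := by
  unfold pvD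
  have hd : (PySem.List.dedup l).Perm (PySem.List.dedup l') := by
    rw [(List.perm_ext_iff_of_nodup (PySem.List.nodup_dedup l) (PySem.List.nodup_dedup l'))]
    intro a; rw [PySem.List.mem_dedup, PySem.List.mem_dedup]; exact h.mem_iff
  have : ∀ k, l.count k = l'.count k := fun k => h.count_eq k
  calc ((PySem.List.dedup l).filter (fun k => decide ((2 : Int) ≤ (l.count k : Int)))).length
      = ((PySem.List.dedup l).filter (fun k => decide ((2 : Int) ≤ (l'.count k : Int)))).length := by
        congr 1; apply List.filter_congr; intro x _; rw [this]
    _ = _ := (hd.filter _).length_eq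

-- elements of the dropped suffix differ from the head, under lex-sortedness
theorem pv_drop_ne (p : Int × Int) (rest : List (Int × Int))
    (h : (p :: rest).Pairwise (fun a b => (toLex a : Int ×ₗ Int) ≤ toLex b)) :
    ∀ x ∈ rest.dropWhile (fun q => q == p), x ≠ p := by
  intro x hx
  cases hr : rest.dropWhile (fun q => q == p) with
  | nil => simp [hr] at hx
  | cons h0 r' =>
    have hh0 : (h0 == p) = false := by
      have := List.head?_dropWhile_not (fun q => q == p) rest
      rw [hr] at this
      simpa using this
    have hh0p : h0 ≠ p := by simpa using hh0
    rw [hr] at hx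
    rcases List.mem_cons.mp hx with rfl | hx'
    · exact hh0p
    · -- x ∈ r'; suppose x = p
      intro hxp
      rw [hxp] at hx'
      -- le p h0 : from pairwise head over rest (h0 ∈ rest)
      have hsub : (rest.dropWhile (fun q => q == p)).Sublist rest := List.dropWhile_sublist _
      have hh0mem : h0 ∈ rest := hsub.mem (by rw [hr]; exact List.mem_cons_self ..)
      have hle1 : (toLex p : Int ×ₗ Int) ≤ toLex h0 := (List.pairwise_cons.mp h).1 h0 hh0mem
      -- le h0 p : pairwise on dropWhile gives h0 ≤ x = p
      have hpw : (rest.dropWhile (fun q => q == p)).Pairwise (fun a b => (toLex a : Int ×ₗ Int) ≤ toLex b) :=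
        ((List.pairwise_cons.mp h).2).sublist hsub
      rw [hr] at hpw
      have hle2 : (toLex h0 : Int ×ₗ Int) ≤ toLex p := (List.pairwise_cons.mp hpw).1 p hx'
      exact hh0p (toLex.injective (le_antisymm hle2 hle1))

theorem pv_scan_eq_aux : ∀ (n : Nat) (l : List (Int × Int)), l.length ≤ n →
    l.Pairwise (fun a b => (toLex a : Int ×ₗ Int) ≤ toLex b) →
    pvScanRuns l = (pvD l : Int) := by
  intro n
  induction n with
  | zero =>
    intro l hl _
    have : l = [] := List.length_eq_zero_iff.mp (Nat.le_zero.mp hl)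
    subst this
    simp [pvScanRuns, pvD, PySem.List.dedup]
  | succ n ih =>
    intro l hl hp
    cases l with
    | nil => simp [pvScanRuns, pvD, PySem.List.dedup]
    | cons p rest =>
      rw [pvScanRuns]
      set t := rest.takeWhile (fun q => q == p) with ht
      set r := rest.dropWhile (fun q => q == p) with hr
      have htr : t ++ r = rest := List.takeWhile_append_dropWhile
      have hA : ∀ x ∈ t, x = p := by
        intro x hx
        have := List.mem_takeWhile_imp hx
        simpa using this
      have hC : ∀ x ∈ r, x ≠ p := pv_drop_ne p rest hp
      have hrlen : r.length ≤ n := by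
        have h3 := List.length_dropWhile_le (fun q => q == p) rest
        rw [← hr] at h3
        have h2 : rest.length ≤ n := by simpa using hl
        omega
      have hrpw : r.Pairwise (fun a b => (toLex a : Int ×ₗ Int) ≤ toLex b) :=
        (List.pairwise_cons.mp hp).2.sublist (List.dropWhile_sublist _)
      rw [ih r hrlen hrpw]
      -- counts
      have hcount_p : (p :: rest).count p = 1 + t.length := by
        have h1 : t.count p = t.length := List.count_eq_length.mpr (by
          intro b hb; exact (hA b hb).symm)
        have h2 : r.count p = 0 := List.count_eq_zero.mpr (by
          intro hc; exact hC p hc rfl)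
        rw [List.count_cons_self, ← htr, List.count_append, h1, h2]
        omega
      have hcount_ne : ∀ x, x ≠ p → (p :: rest).count x = r.count x := by
        intro x hx
        have h1 : t.count x = 0 := List.count_eq_zero.mpr (by
          intro hc; exact hx (hA x hc))
        rw [← htr]
        simp [List.count_cons, List.count_append, h1]
        exact fun hh => hx hh.symm
      -- the distinct-cells count decomposes
      have hpnotr : p ∉ PySem.List.dedup r := by
        rw [PySem.List.mem_dedup]; intro hc; exact hC p hc rfl
      have hperm : (PySem.List.dedup (p :: rest)).Perm (p :: PySem.List.dedup r) := by
        rw [List.perm_ext_iff_of_nodup (PySem.List.nodup_dedup _)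
          (List.nodup_cons.mpr ⟨hpnotr, PySem.List.nodup_dedup r⟩)]
        intro a
        rw [PySem.List.mem_dedup, List.mem_cons, List.mem_cons, PySem.List.mem_dedup, ← htr,
          List.mem_append]
        constructor
        · rintro (rfl | hat | har)
          · exact Or.inl rfl
          · exact Or.inl (hA a hat)
          · exact Or.inr har
        · rintro (rfl | har)
          · exact Or.inl rfl
          · exact Or.inr (Or.inr har)
      have hfiltr :
          ((PySem.List.dedup r).filter (fun k => decide ((2 : Int) ≤ ((p :: rest).count k : Int))))
            = ((PySem.List.dedup r).filter (fun k => decide ((2 : Int) ≤ (r.count k : Int)))) := by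
        apply List.filter_congr
        intro x hx
        rw [PySem.List.mem_dedup] at hx
        rw [hcount_ne x (hC x hx)]
      have hD : pvD (p :: rest)
          = (if (2 : Int) ≤ 1 + (t.length : Int) then 1 else 0) + pvD r := by
        unfold pvD
        rw [(hperm.filter _).length_eq, List.filter_cons, hfiltr, hcount_p]
        simp only [Nat.cast_add, Nat.cast_one]
        by_cases hP : (2 : Int) ≤ 1 + (t.length : Int)
        · simp only [hP, if_true, decide_true, List.length_cons]
          omega
        · simp [hP]
      rw [hD]
      push_cast [apply_ite]
      split_ifs <;> omega
  
theorem pv_scan_eq (l : List (Int × Int))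
    (h : l.Pairwise (fun a b => (toLex a : Int ×ₗ Int) ≤ toLex b)) :
    pvScanRuns l = (pvD l : Int) :=
  pv_scan_eq_aux l.length l le_rfl h

-- B's result is the same count.
theorem pvB_eq (entries : List ((Int × Int) × (Int × Int))) :
    part_2_alt entries = (pvD (entries.flatMap pvPoints) : Int) := by
  unfold part_2_alt
  have hpw : ((entries.flatMap pvPoints).mergeSort
      (fun a b => decide ((toLex a : Int ×ₗ Int) ≤ toLex b))).Pairwise
      (fun a b => (toLex a : Int ×ₗ Int) ≤ toLex b) := by
    have := List.pairwise_mergeSort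
      (le := fun a b : Int × Int => decide ((toLex a : Int ×ₗ Int) ≤ toLex b))
      (by intro a b c hab hbc
          simp only [decide_eq_true_eq] at *
          exact le_trans hab hbc)
      (by intro a b
          simp only [Bool.or_eq_true, decide_eq_true_eq]
          exact le_total _ _)
      (entries.flatMap pvPoints)
    exact this.imp (by intro a b h; simpa using h)
  rw [pv_scan_eq _ hpw, pvD_perm (List.mergeSort_perm _ _)]

-- ===== VERDICT (by name: the statement is the Claim_ definition above) =====
theorem part_2_spec : Claim_equal_part_2 := by
  intro entries _
  unfold Spec_part_2
  rw [pvA_eq, pvB_eq]
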